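-- pv_equiv track=rewrite | github.com/alex0811/CheckiO | 历史打卡（格式未整理）/determine-the-order.py | get
-- ===== SOURCE A (Python) =====
-- def get(cmpItem, c, result):
--     l_list = cmpItem[0:cmpItem.index(c)]
--     r_list = cmpItem[cmpItem.index(c)+1:]
--     min_c = ''
--     max_c = ''
--     for l_item in reversed(l_list):
--         if l_item in result:
--             min_c = l_item
--             break
--     for r_item in r_list:
--         if r_item in result:
--             max_c = r_item
--             break
--     return min_c, max_c
-- ===== SOURCE B (Python) =====
-- def get(cmpItem, c, result):
--     idx = cmpItem.index(c)
--     min_c = ''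
--     max_c = ''
--     for i, ch in enumerate(cmpItem):
--         if i < idx:
--             if ch in result:
--                 min_c = ch
--         elif i > idx:
--             if ch in result:
--                 max_c = ch
--                 break
--     return min_c, max_c
-- ===== Notes on version B (the rewrite author's own statement) =====
-- stated objective: simpler
-- what changed: Replaces A's two slices plus a reversed scan and a forward scan with one single forward pass over enumerate(cmpItem), overwriting min_c before the index of c and breaking on the first hit after it; Pre_ excludes inputs where c is not a substring of cmpItem, on which both A and B raise ValueError.
import Mathlib
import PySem

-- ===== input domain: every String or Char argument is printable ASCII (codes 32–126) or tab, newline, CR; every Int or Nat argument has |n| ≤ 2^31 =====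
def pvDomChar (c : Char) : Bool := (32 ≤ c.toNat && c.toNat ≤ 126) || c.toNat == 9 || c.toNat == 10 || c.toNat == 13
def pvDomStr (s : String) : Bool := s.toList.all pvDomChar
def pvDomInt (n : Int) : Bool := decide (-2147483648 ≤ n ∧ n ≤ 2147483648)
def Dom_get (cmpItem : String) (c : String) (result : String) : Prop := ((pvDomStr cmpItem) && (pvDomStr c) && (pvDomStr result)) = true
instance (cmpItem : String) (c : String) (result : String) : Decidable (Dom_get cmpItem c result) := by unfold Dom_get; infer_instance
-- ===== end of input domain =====

-- B does one forward pass over enumerate(cmpItem) instead of A's two slices with a reversed scan and a forward scan (objective: simpler).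

-- ===== PORT A =====
-- the 'for … in …: if … : <assign>; break' loop of A: returns the first element of xs
-- that occurs in res (as a one-char string), else the accumulator ('')
def getLoopA (xs : List Char) (res : List Char) (acc : String) : String :=
  match xs with
  | [] => acc
  | x :: rest => if PySem.Chars.isIn [x] res then String.ofList [x] else getLoopA rest res acc

def get (cmpItem : String) (c : String) (result : String) : String × String :=
  let idx := PySem.Chars.find cmpItem.toList c.toList        -- cmpItem.index(c); Pre_get makes it non-raising
  let l_list := PySem.List.slice cmpItem.toList (some 0) (some idx)
  let r_list := PySem.List.slice cmpItem.toList (some (idx + 1)) none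
  let min_c := getLoopA l_list.reverse result.toList ""
  let max_c := getLoopA r_list result.toList ""
  (min_c, max_c)

-- ===== PORT B =====
-- B's single loop over enumerate(cmpItem) with state (min_c, max_c) and break
def getLoopB (xs : List (Int × Char)) (idx : Int) (res : List Char) (mn mx : String) : String × String :=
  match xs with
  | [] => (mn, mx)
  | (i, ch) :: rest =>
    if i < idx then
      if PySem.Chars.isIn [ch] res then getLoopB rest idx res (String.ofList [ch]) mx
      else getLoopB rest idx res mn mx
    else if idx < i then
      if PySem.Chars.isIn [ch] res then (mn, String.ofList [ch])
      else getLoopB rest idx res mn mx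
    else getLoopB rest idx res mn mx

def get_alt (cmpItem : String) (c : String) (result : String) : String × String :=
  let idx := PySem.Chars.find cmpItem.toList c.toList
  getLoopB (PySem.List.enumerate cmpItem.toList 0) idx result.toList "" ""

-- ===== PRECONDITION & SPEC =====
-- Pre_ excludes exactly the inputs where c is not a substring of cmpItem: there
-- cmpItem.index(c) raises ValueError (in A and in B alike).
def Pre_get (cmpItem : String) (c : String) (result : String) : Prop :=
  PySem.Chars.isIn c.toList cmpItem.toList = true
instance (cmpItem : String) (c : String) (result : String) : Decidable (Pre_get cmpItem c result) := by unfold Pre_get; infer_instance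

def pvWitness_get : String × String × String := ("badc", "d", "abc")

def Spec_get (cmpItem : String) (c : String) (result : String) (out : String × String) : Prop := out = get_alt cmpItem c result
instance (cmpItem : String) (c : String) (result : String) (out : String × String) : Decidable (Spec_get cmpItem c result out) := by unfold Spec_get; infer_instance

-- ===== CLAIM (what is proved, stated in full; the proofs are below) =====
def Claim_equal_get : Prop := ∀ (cmpItem : String) (c : String) (result : String), Dom_get cmpItem c result → Pre_get cmpItem c result → Spec_get cmpItem c result (get cmpItem c result)

-- ===== LEMMAS AND PROOFS =====

-- appending one element to the scanned list only changes the fallback accumulator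
theorem getLoopA_append (ys : List Char) (x : Char) (res : List Char) (acc : String) :
    getLoopA (ys ++ [x]) res acc
      = getLoopA ys res (if PySem.Chars.isIn [x] res then String.ofList [x] else getLoopA [] res acc) := by
  induction ys with
  | nil => simp [getLoopA]
  | cons y t ih => by_cases h : PySem.Chars.isIn [y] res <;> simp [getLoopA, h, ih]

-- right region: every index after idx, B's loop computes A's second scan
theorem getLoopB_right (suf : List Char) (idx : Int) (res : List Char) (k : Int)
    (hk : idx < k) (mn mx : String) :
    getLoopB (PySem.List.enumerate suf k) idx res mn mx = (mn, getLoopA suf res mx) := by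
  induction suf generalizing k mx with
  | nil => simp [PySem.List.enumerate_nil, getLoopB, getLoopA]
  | cons x t ih =>
    rw [PySem.List.enumerate_cons]
    by_cases h : PySem.Chars.isIn [x] res <;>
      simp [getLoopB, getLoopA, h, not_lt.mpr (le_of_lt hk), hk, ih (k + 1) (by omega)]

-- left region: B's loop over a prefix that lies entirely before idx folds A's
-- reversed first scan into the accumulator mn
theorem getLoopB_left (pre suf : List Char) (idx : Int) (res : List Char) (k : Int)
    (hk : k + pre.length ≤ idx) (mn mx : String) :
    getLoopB (PySem.List.enumerate (pre ++ suf) k) idx res mn mx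
      = getLoopB (PySem.List.enumerate suf (k + pre.length)) idx res (getLoopA pre.reverse res mn) mx := by
  induction pre generalizing k mn with
  | nil => simp [getLoopA]
  | cons x t ih =>
    rw [List.cons_append, PySem.List.enumerate_cons]
    have hx : k < idx := by simp at hk; omega
    have hrec := ih (k + 1) (by simp at hk ⊢; omega)
    by_cases h : PySem.Chars.isIn [x] res <;>
      simp [getLoopB, hx, h, getLoopA_append, getLoopA, hrec] <;>
      ring_nf

theorem get_eq_get_alt (cmpItem c result : String)
    (hpre : PySem.Chars.isIn c.toList cmpItem.toList = true) : get cmpItem c result = get_alt cmpItem c result := by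
  unfold _root_.get get_alt
  set s := cmpItem.toList with hs
  set res := result.toList
  have hfind : 0 ≤ PySem.Chars.find s c.toList := (PySem.Chars.find_nonneg_iff s c.toList).mpr
    ((PySem.Chars.isIn_iff_infix c.toList s).mp hpre)
  set idx := PySem.Chars.find s c.toList with hidx
  obtain ⟨n, hn⟩ : ∃ n : Nat, idx = (n : Int) := ⟨idx.toNat, (Int.toNat_of_nonneg hfind).symm⟩
  have hle : n ≤ s.length := by
    have := PySem.Chars.find_le_length s c.toList
    omega
  have hslice_l : PySem.List.slice s (some 0) (some idx) = s.take n := by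
    rw [hn, show ((0:Int)) = ((0:Nat):Int) by simp]
    simp
  have hslice_r : PySem.List.slice s (some (idx + 1)) none = s.drop (n + 1) := by
    rw [hn, show (n : Int) + 1 = ((n + 1 : Nat) : Int) by push_cast; ring,
      PySem.List.slice_from_natCast]
  have hsplit : s = s.take n ++ s.drop n := (List.take_append_drop n s).symm
  dsimp only
  rw [hslice_l, hslice_r]
  conv_rhs => rw [hsplit]
  rw [getLoopB_left (s.take n) (s.drop n) idx res 0
        (by rw [hn, List.length_take_of_le hle]; omega) "" ""]
  have hlen : ((0 : Int) + (s.take n).length) = idx := by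
    rw [hn, List.length_take_of_le hle]; omega
  rw [hlen]
  cases hd : s.drop n with
  | nil =>
    have : s.drop (n + 1) = [] := by
      rw [← List.tail_drop, hd]
      rfl
    simp [this, PySem.List.enumerate_nil, getLoopB, getLoopA]
  | cons ch suf =>
    have hsuf : s.drop (n + 1) = suf := by
      rw [← List.tail_drop, hd]
      rfl
    rw [PySem.List.enumerate_cons]
    simp only [getLoopB, lt_irrefl, if_false]
    rw [getLoopB_right suf idx res (idx + 1) (by omega) _ ""]
    rw [hsuf]

-- ===== VERDICT (by name: the statement is the Claim_ definition above) =====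
theorem get_spec : Claim_equal_get := by
  intro cmpItem c result _ hpre
  unfold Spec_get
  exact get_eq_get_alt cmpItem c result hpre
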